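-- pv_equiv track=rewrite | github.com/denisbilli/PyAdventOfCode24 | exercise06.py | has_repeated_sublist_of_4
-- ===== SOURCE A (Python) =====
-- def has_repeated_sublist_of_4(lst):
--     """
--     Verifica se nella lista lst esiste una sotto-lista contigua di 4 elementi
--     che compare almeno due volte.
--     Restituisce True se esiste, False altrimenti.
--     """
--     seen = set()
--     length = len(lst)
--
--     if length < 4:
--         return False
--
--     for i in range(length - 3):
--         # Estrae il sotto-elenco di 4 elementi come una tupla (immutabile e hashabile)
--         sub = tuple(lst[i:i+4])
--         if sub in seen:
--             # Questa sotto-lista di 4 elementi era già stata vista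
--             return True
--         seen.add(sub)
--
--     # Nessuna sotto-lista di 4 elementi compare almeno due volte
--     return False
-- ===== SOURCE B (Python) =====
-- def has_repeated_sublist_of_4(lst):
--     subs = sorted(tuple(lst[i:i+4]) for i in range(len(lst) - 3))
--     return any(a == b for a, b in zip(subs, subs[1:]))
-- ===== Notes on version B (the rewrite author's own statement) =====
-- stated objective: alternative
-- what changed: B detects a repeated 4-window by sorting the list of window tuples and scanning adjacent pairs for equality, instead of A's hash-set membership scan with early return.
import Mathlib
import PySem

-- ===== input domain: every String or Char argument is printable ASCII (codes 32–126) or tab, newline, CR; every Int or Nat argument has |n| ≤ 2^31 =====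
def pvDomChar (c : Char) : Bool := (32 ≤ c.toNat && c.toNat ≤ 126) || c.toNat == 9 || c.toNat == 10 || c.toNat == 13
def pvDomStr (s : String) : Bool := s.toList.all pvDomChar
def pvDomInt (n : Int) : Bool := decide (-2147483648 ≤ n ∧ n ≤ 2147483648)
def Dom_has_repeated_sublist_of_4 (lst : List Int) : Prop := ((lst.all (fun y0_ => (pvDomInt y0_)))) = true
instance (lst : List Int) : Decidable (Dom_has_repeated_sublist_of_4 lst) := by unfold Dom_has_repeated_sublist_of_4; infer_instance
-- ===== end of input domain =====

-- B replaces A's hash-set membership scan by a sort of the 4-windows followed by an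
-- adjacent-pair equality scan (objective: alternative algorithm, no hashing).

-- ===== PORT A =====
-- the 'for i in range(length-3): … return True … seen.add(sub)' loop, early return as recursion
def hrs4_loopA (lst : List Int) (seen : PySem.Set (List Int)) (idxs : List Int) : Bool :=
  match idxs with
  | [] => false
  | i :: rest =>
    let sub := PySem.List.slice lst (some i) (some (i + 4))
    if PySem.Set.contains seen sub then true
    else hrs4_loopA lst (PySem.Set.add seen sub) rest

def has_repeated_sublist_of_4 (lst : List Int) : Bool :=
  let length := PySem.List.len lst
  if length < 4 then false
  else hrs4_loopA lst PySem.Set.empty (PySem.List.pyRange 0 (length - 3) 1)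

-- ===== PORT B =====
def has_repeated_sublist_of_4_alt (lst : List Int) : Bool :=
  let subs := @PySem.List.sorted (List Int) (List Int) List.instLinearOrder.toLT
    LinearOrder.toDecidableLT
    ((PySem.List.pyRange 0 (PySem.List.len lst - 3) 1).map
      (fun i => PySem.List.slice lst (some i) (some (i + 4))))
    (fun x => x) false
  (subs.zip (PySem.List.slice subs (some 1) none)).any (fun p => p.1 == p.2)

-- ===== PRECONDITION & SPEC =====
def Spec_has_repeated_sublist_of_4 (lst : List Int) (out : Bool) : Prop := out = has_repeated_sublist_of_4_alt lst
instance (lst : List Int) (out : Bool) : Decidable (Spec_has_repeated_sublist_of_4 lst out) := by unfold Spec_has_repeated_sublist_of_4; infer_instance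

-- ===== CLAIM (what is proved, stated in full; the proofs are below) =====
def Claim_equal_has_repeated_sublist_of_4 : Prop := ∀ (lst : List Int), Dom_has_repeated_sublist_of_4 lst → Spec_has_repeated_sublist_of_4 lst (has_repeated_sublist_of_4 lst)

-- ===== LEMMAS AND PROOFS =====

-- A's early-return loop returns true iff the windows it would push are not fresh-and-distinct
theorem hrs4_loopA_eq (lst : List Int) (idxs : List Int) (seen : PySem.Set (List Int)) :
    (hrs4_loopA lst seen idxs = true) ↔
      ¬ ((idxs.map (fun i => PySem.List.slice lst (some i) (some (i + 4)))).Nodup ∧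
         ∀ y ∈ idxs.map (fun i => PySem.List.slice lst (some i) (some (i + 4))), y ∉ seen) := by
  induction idxs generalizing seen with
  | nil => simp [hrs4_loopA]
  | cons i rest ih =>
    simp only [hrs4_loopA, List.map_cons]
    set sub := PySem.List.slice lst (some i) (some (i + 4)) with hsub
    by_cases hc : PySem.Set.contains seen sub = true
    · have hmem : sub ∈ seen := (PySem.Set.contains_iff seen sub).mp hc
      simp only [hc, if_true, true_iff]
      rintro ⟨-, hdisj⟩
      exact hdisj sub (by simp) hmem
    · have hnmem : sub ∉ seen := fun h => hc ((PySem.Set.contains_iff seen sub).mpr h)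
      simp only [hc, if_false, Bool.false_eq_true]
      rw [ih]
      have hadd : ∀ y, y ∈ PySem.Set.add seen sub ↔ y ∈ seen ∨ y = sub :=
        fun y => PySem.Set.mem_add seen sub y
      constructor
      · intro h hcontra
        apply h
        obtain ⟨hnd, hdisj⟩ := hcontra
        obtain ⟨hsubnot, hnd'⟩ := List.nodup_cons.mp hnd
        refine ⟨hnd', ?_⟩
        intro y hy hys
        rcases (hadd y).mp hys with hys' | rfl
        · exact hdisj y (by simp [hy]) hys'
        · exact hsubnot hy
      · intro h hcontra
        apply h
        obtain ⟨hnd', hdisj⟩ := hcontra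
        have hsubnot : sub ∉ rest.map (fun i => PySem.List.slice lst (some i) (some (i + 4))) :=
          fun hm => hdisj sub hm ((hadd sub).mpr (Or.inr rfl))
        refine ⟨List.nodup_cons.mpr ⟨hsubnot, hnd'⟩, ?_⟩
        intro y hy
        rcases List.mem_cons.mp hy with rfl | hy'
        · exact hnmem
        · intro hys; exact hdisj y hy' ((hadd y).mpr (Or.inl hys))

-- in a ≤-sorted list, an adjacent equal pair exists iff the list has a duplicate
theorem hrs4_adj_dup (l : List (List Int)) (h : l.Pairwise (fun a b : List Int => a ≤ b)) :
    ((l.zip (l.drop 1)).any (fun p => p.1 == p.2) = true) ↔ ¬ l.Nodup := by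
  induction l with
  | nil => simp
  | cons x t ih =>
    match t with
    | [] => simp
    | y :: t' =>
      have hpt : (y :: t').Pairwise (fun a b : List Int => a ≤ b) := h.sublist (List.sublist_cons_self x _)
      have hxle : ∀ z ∈ y :: t', x ≤ z := fun z hz => (List.pairwise_cons.mp h).1 z hz
      simp only [List.drop_succ_cons, List.drop_zero, List.zip_cons_cons, List.any_cons]
      by_cases hxy : x = y
      · subst hxy
        simp [List.nodup_cons]
      · have hlt : x < y := lt_of_le_of_ne (hxle y (by simp)) hxy
        have hxnot : x ∉ y :: t' := by
          intro hm
          rcases List.mem_cons.mp hm with rfl | hm'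
          · exact hxy rfl
          · have hyz : y ≤ x := by
              have := List.pairwise_cons.mp hpt
              rcases List.mem_cons.mp hm with h1 | h2
              · exact le_of_eq h1.symm
              · exact this.1 x h2
            exact absurd (lt_of_lt_of_le hlt hyz) (lt_irrefl x)
        have hbeq : (x == y) = false := by simp [hxy]
        rw [hbeq, Bool.false_or]
        simp only [List.drop_succ_cons, List.drop_zero] at ih
        rw [ih hpt]
        simp [List.nodup_cons, hxnot]

-- when len(lst) < 4 the index range is empty
theorem hrs4_range_empty (lst : List Int) (h : PySem.List.len lst < 4) :
    PySem.List.pyRange 0 (PySem.List.len lst - 3) 1 = [] := by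
  simp only [PySem.List.len] at h
  simp [PySem.List.pyRange]
  omega

-- ===== VERDICT (by name: the statement is the Claim_ definition above) =====
theorem has_repeated_sublist_of_4_spec : Claim_equal_has_repeated_sublist_of_4 := by
  intro lst _
  unfold Spec_has_repeated_sublist_of_4 has_repeated_sublist_of_4 has_repeated_sublist_of_4_alt
  simp only []
  set wins := (PySem.List.pyRange 0 (PySem.List.len lst - 3) 1).map
    (fun i => PySem.List.slice lst (some i) (some (i + 4))) with hwins
  set subs := @PySem.List.sorted (List Int) (List Int) List.instLinearOrder.toLT
    LinearOrder.toDecidableLT wins (fun x => x) false with hsubs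
  have hslice : PySem.List.slice subs (some 1) none = subs.drop 1 := by
    simpa using PySem.List.slice_from_one subs
  rw [hslice]
  have hperm : subs.Perm wins := @PySem.List.sorted_perm (List Int) (List Int) List.instLinearOrder.toLT LinearOrder.toDecidableLT wins (fun x => x) false
  have hpw : subs.Pairwise (fun a b : List Int => a ≤ b) := by
    rw [hsubs]; exact @PySem.List.sorted_pairwise (List Int) (List Int) _ wins (fun x => x)
  have hB := hrs4_adj_dup subs hpw
  have hnd : subs.Nodup ↔ wins.Nodup := hperm.nodup_iff
  by_cases h4 : PySem.List.len lst < 4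
  · rw [if_pos h4]
    rw [hwins, hrs4_range_empty lst h4] at hsubs
    simp only [List.map_nil] at hsubs
    have : subs = [] := by
      rw [hsubs]; simp [PySem.List.sorted_eq_nil_iff]
    rw [this]
    simp
  · rw [if_neg h4]
    have hA := hrs4_loopA_eq lst (PySem.List.pyRange 0 (PySem.List.len lst - 3) 1) PySem.Set.empty
    rw [← hwins] at hA
    have hempty : ∀ y ∈ wins, y ∉ (PySem.Set.empty : PySem.Set (List Int)) := by
      intro y _ hy; simp [PySem.Set.empty] at hy
    rcases Bool.eq_false_or_eq_true (hrs4_loopA lst PySem.Set.empty (PySem.List.pyRange 0 (PySem.List.len lst - 3) 1)) with hb | hb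
    · rw [hb]
      have hndneg : ¬ wins.Nodup := fun hn => (hA.mp hb) ⟨hn, hempty⟩
      have : ¬ subs.Nodup := fun hn => hndneg (hnd.mp hn)
      exact (hB.mpr this).symm
    · rw [hb]
      have hwnd : wins.Nodup := by
        by_contra hc
        have ht : hrs4_loopA lst PySem.Set.empty (PySem.List.pyRange 0 (PySem.List.len lst - 3) 1) = true := by
          rw [hA]; rintro ⟨hnd', -⟩; exact hc hnd'
        rw [ht] at hb; exact absurd hb (by simp)
      have : subs.Nodup := hnd.mpr hwnd
      symm
      rw [Bool.eq_false_iff]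
      intro hany
      exact (hB.mp hany) this
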